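-- pv_equiv track=rewrite | github.com/appul/applebot | applebot/utils.py | table_align
-- ===== SOURCE A (Python) =====
-- def table_align(lines, alignment=None):
--     adjusts = {'r': str.rjust, 'l': str.ljust}
--     alignment = iter(alignment)
--     cols = transpose_list(lines)
--
--     for i, col in enumerate(cols):
--         adjust = adjusts[next(alignment, 'l')]
--         width = max(map(len, col))
--         cols[i] = [adjust(s, width) for s in col]
--
--     return transpose_list(cols)
--
-- def transpose_list(matrix):
--     return list(zip(*matrix))
-- ===== SOURCE B (Python) =====
-- def table_align(lines, alignment=None):
--     adjusts = {'r': str.rjust, 'l': str.ljust}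
--     alignment = iter(alignment)
--     ncols = min((len(r) for r in lines), default=0)
--     if ncols == 0:
--         return []
--     widths = [max(len(row[j]) for row in lines) for j in range(ncols)]
--     adjs = [adjusts[next(alignment, 'l')] for _ in range(ncols)]
--     return [tuple(adjs[j](row[j], widths[j]) for j in range(ncols)) for row in lines]
-- ===== Notes on version B (the rewrite author's own statement) =====
-- stated objective: alternative
-- what changed: B drops A's transpose -> per-column rewrite -> transpose pipeline: it computes the column count and a widths/alignment table in one pass and then emits the padded rows directly row-major.
import Mathlib
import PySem

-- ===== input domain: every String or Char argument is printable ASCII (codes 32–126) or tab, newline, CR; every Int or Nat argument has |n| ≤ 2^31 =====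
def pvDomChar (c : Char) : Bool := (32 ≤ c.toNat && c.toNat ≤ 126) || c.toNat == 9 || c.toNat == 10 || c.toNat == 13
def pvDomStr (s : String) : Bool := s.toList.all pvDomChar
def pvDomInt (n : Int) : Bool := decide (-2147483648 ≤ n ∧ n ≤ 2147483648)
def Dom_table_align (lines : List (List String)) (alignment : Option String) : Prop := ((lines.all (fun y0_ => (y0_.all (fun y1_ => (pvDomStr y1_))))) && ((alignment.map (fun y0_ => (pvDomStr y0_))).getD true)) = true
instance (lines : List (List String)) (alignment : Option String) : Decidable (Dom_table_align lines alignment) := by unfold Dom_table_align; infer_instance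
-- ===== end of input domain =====

-- B replaces A's transpose → per-column rewrite → transpose pipeline with width/alignment
-- tables built once and a single row-major pass that emits the output rows directly.

-- s.ljust(w) / s.rjust(w): exact (space padding, character counts)
def pvLjust (s : String) (w : Nat) : String := String.ofList (s.toList ++ List.replicate (w - s.toList.length) ' ')
def pvRjust (s : String) (w : Nat) : String := String.ofList (List.replicate (w - s.toList.length) ' ' ++ s.toList)

-- ===== PORT A =====
-- transpose_list(matrix) = list(zip(*matrix)): min-length truncation; row.getD j "" is exact since j < every row length
def transpose_list (m : List (List String)) : List (List String) :=
  match m with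
  | [] => []
  | r :: rs =>
    let n := rs.foldl (fun acc row => Nat.min acc row.length) r.length
    (List.range n).map (fun j => (r :: rs).map (fun row => row.getD j ""))

-- the for-loop over columns, consuming the alignment iterator (= remaining chars); next(alignment,'l') = headD 'l'.
-- adjusts[c] raises KeyError for c ∉ {'l','r'}: those inputs are excluded by Pre_; the port falls to ljust there.
def alignColsA : List (List String) → List Char → List (List String)
  | [], _ => []
  | col :: rest, chars =>
    let c := chars.headD 'l'
    let width := ((col.map (fun s => s.toList.length)).max?).getD 0
    (col.map (fun s => if c = 'r' then pvRjust s width else pvLjust s width)) :: alignColsA rest chars.tail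

def table_align (lines : List (List String)) (alignment : Option String) : List (List String) :=
  match alignment with
  | none => []  -- Python raises TypeError (iter(None)); excluded by Pre_
  | some a => transpose_list (alignColsA (transpose_list lines) a.toList)

-- ===== PORT B =====
def table_align_alt (lines : List (List String)) (alignment : Option String) : List (List String) :=
  match alignment with
  | none => []  -- iter(None) raises; excluded by Pre_
  | some a =>
    let ncols := ((lines.map List.length).min?).getD 0     -- min((len(r) for r in lines), default=0)
    if ncols = 0 then []
    else
      let widths := (List.range ncols).map (fun j => ((lines.map (fun row => (row.getD j "").toList.length)).max?).getD 0)
      let adjs := (List.range ncols).map (fun j => a.toList.getD j 'l')   -- next(alignment,'l') per column, in order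
      lines.map (fun row => (List.range ncols).map (fun j =>
        if adjs.getD j 'l' = 'r' then pvRjust (row.getD j "") (widths.getD j 0)
        else pvLjust (row.getD j "") (widths.getD j 0)))

-- ===== PRECONDITION & SPEC =====
-- Pre_ = exactly where Python A returns: alignment is a string (iter(None) is a TypeError) and each of the
-- first min-row-length alignment characters is 'l' or 'r' (anything else is a KeyError in adjusts[...]).
def Pre_table_align (lines : List (List String)) (alignment : Option String) : Prop :=
  alignment ≠ none ∧
  ∀ j, j < ((lines.map List.length).min?).getD 0 →
    ((alignment.getD "").toList.getD j 'l' = 'l' ∨ (alignment.getD "").toList.getD j 'l' = 'r')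
instance (lines : List (List String)) (alignment : Option String) : Decidable (Pre_table_align lines alignment) := by
  unfold Pre_table_align; infer_instance

def pvWitness_table_align : List (List String) × Option String := ([["a", "bb"], ["ccc", "d"]], some "rl")

def Spec_table_align (lines : List (List String)) (alignment : Option String) (out : List (List String)) : Prop := out = table_align_alt lines alignment
instance (lines : List (List String)) (alignment : Option String) (out : List (List String)) : Decidable (Spec_table_align lines alignment out) := by unfold Spec_table_align; infer_instance

-- ===== CLAIM (what is proved, stated in full; the proofs are below) =====
def Claim_equal_table_align : Prop := ∀ (lines : List (List String)) (alignment : Option String), Dom_table_align lines alignment → Pre_table_align lines alignment → Spec_table_align lines alignment (table_align lines alignment)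

-- ===== LEMMAS AND PROOFS =====

def pvNcols (lines : List (List String)) : Nat := ((lines.map List.length).min?).getD 0

theorem foldl_min_eq (r : List String) (rs : List (List String)) :
    List.foldl (fun acc row => Nat.min acc row.length) r.length rs = pvNcols (r :: rs) := by
  simp only [pvNcols, List.map_cons, List.min?_cons', Option.getD_some, List.foldl_map]

theorem transpose_closed' (m : List (List String)) :
    transpose_list m = (List.range (pvNcols m)).map (fun j => m.map (fun row => row.getD j "")) := by
  cases m with
  | nil => simp [transpose_list, pvNcols]
  | cons r rs => rw [transpose_list]; rw [foldl_min_eq]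

theorem alignColsA_closed' (cols : List (List String)) (chars : List Char) :
    alignColsA cols chars = (List.range cols.length).map (fun j =>
      let col := cols.getD j []
      let c := chars.getD j 'l'
      let width := ((col.map (fun s => s.toList.length)).max?).getD 0
      col.map (fun s => if c = 'r' then pvRjust s width else pvLjust s width)) := by
  induction cols generalizing chars with
  | nil => simp [alignColsA]
  | cons col rest ih =>
    rw [alignColsA, ih chars.tail]
    simp only [List.length_cons, List.range_succ_eq_map, List.map_cons, List.map_map]
    congr 1
    · cases chars <;> simp
    · apply List.map_congr_left
      intro j hj
      simp
theorem minrep (L : Nat) : ∀ k, (List.replicate (k+1) L).min? = some L := by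
  intro k; induction k with
  | zero => simp
  | succ k ih => rw [List.replicate_succ]; simp [ih]

theorem getD_map_range {α : Type} (n : Nat) (g : Nat → α) (j : Nat) (h : j < n) (d : α) :
    ((List.range n).map g).getD j d = g j := by
  rw [List.getD_eq_getElem _ _ (by simpa using h)]
  simp

theorem main_eq (lines : List (List String)) (alignment : Option String)
    (hpre : Pre_table_align lines alignment) :
    table_align lines alignment = table_align_alt lines alignment := by
  obtain ⟨hne, _⟩ := hpre
  cases alignment with
  | none => exact absurd rfl hne
  | some a =>
    simp only [table_align, table_align_alt]
    by_cases hn : pvNcols lines = 0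
    · rw [transpose_closed' lines, hn]
      simp only [List.range_zero, List.map_nil]
      rw [alignColsA]
      rw [show transpose_list [] = [] from rfl]
      rw [show ((lines.map List.length).min?).getD 0 = 0 from hn]
      simp
    · have hn' : 0 < pvNcols lines := Nat.pos_of_ne_zero hn
      have hL0 : lines ≠ [] := by
        intro h; subst h; simp [pvNcols] at hn
      have hLpos : 0 < lines.length := List.length_pos_iff.mpr hL0
      set n := pvNcols lines with hndef
      set L := lines.length with hLdef
      set g : Nat → List String := fun j => lines.map (fun row => row.getD j "") with hg
      rw [transpose_closed' lines, alignColsA_closed']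
      simp only [List.length_map, List.length_range]
      -- rewrite cols.getD j [] to g j inside the outer map
      rw [List.map_congr_left (l := List.range n)
        (f := fun j =>
          let col := (((List.range n).map g).getD j [])
          let c := a.toList.getD j 'l'
          let width := ((col.map (fun s => s.toList.length)).max?).getD 0
          col.map (fun s => if c = 'r' then pvRjust s width else pvLjust s width))
        (g := fun j =>
          let c := a.toList.getD j 'l'
          let width := (((g j).map (fun s => s.toList.length)).max?).getD 0
          (g j).map (fun s => if c = 'r' then pvRjust s width else pvLjust s width))
        (by intro j hj; simp only []; rw [getD_map_range n g j (List.mem_range.mp hj)])]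
      set F : Nat → List String := fun j =>
          let c := a.toList.getD j 'l'
          let width := (((g j).map (fun s => s.toList.length)).max?).getD 0
          (g j).map (fun s => if c = 'r' then pvRjust s width else pvLjust s width) with hF
      have hlenF : ∀ j, (F j).length = L := by intro j; simp only [hF, hg, List.length_map]; exact hLdef.symm
      have hncols' : pvNcols ((List.range n).map F) = L := by
        have h1 : ((List.range n).map F).map List.length = List.replicate n L := by
          rw [List.map_map]
          have h2 : (List.length ∘ F) = fun _ => L := funext fun j => hlenF j
          rw [h2, List.map_const']; simp
        obtain ⟨k, hk⟩ : ∃ k, n = k + 1 := ⟨n - 1, by omega⟩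
        simp only [pvNcols]
        rw [h1, hk, minrep, Option.getD_some]
      rw [transpose_closed', hncols']
      rw [show ((lines.map List.length).min?).getD 0 = n from rfl, if_neg hn]
      apply List.ext_getElem (by simp only [List.length_map, List.length_range]; exact hLdef)
      intro i h1 h2
      simp only [List.getElem_map, List.getElem_range, List.map_map]
      apply List.map_congr_left
      intro j hj
      have hjn : j < n := List.mem_range.mp hj
      have hiL : i < L := by simpa using h1
      simp only [Function.comp_apply, hF, hg]
      rw [getD_map_range n _ j hjn, getD_map_range n _ j hjn]
      rw [List.getD_eq_getElem _ _ (by simp; omega)]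
      simp only [List.getElem_map, List.map_map, Function.comp_def]

-- ===== VERDICT (by name: the statement is the Claim_ definition above) =====
theorem table_align_spec : Claim_equal_table_align := by
  intro lines alignment _ hpre
  unfold Spec_table_align
  exact main_eq lines alignment hpre
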